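-- pv_equiv track=rewrite | github.com/jiyoungzero/2023-Codingtest-Study | jiyoung풀이/ZB문제/4명의사람뽑기.py | solution
-- ===== SOURCE A (Python) =====
-- def solution(names):
--     answer = 1
--     names = list(set(names))
--     n = len(names)
--     cnt = 0
--
--     while cnt != 4:
--         answer *= n
--         n -= 1
--         cnt += 1
--
--     for i in range(1,5):
--         answer //= i
--
--     return answer
-- ===== SOURCE B (Python) =====
-- def solution(names):
--     # One-pass DP: dp[k] = number of k-element subsets of the distinct names seen so far.
--     seen = set()
--     dp = [1, 0, 0, 0, 0]
--     for name in names: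
--         if name not in seen:
--             seen.add(name)
--             for k in range(4, 0, -1):
--                 dp[k] += dp[k - 1]
--     return dp[4]
-- ===== Notes on version B (the rewrite author's own statement) =====
-- stated objective: alternative
-- what changed: Replaces the dedup-then-falling-factorial-and-divide computation with a single left-to-right pass that maintains a Pascal-triangle DP dp[k] = number of k-subsets of the distinct names seen so far, returning dp[4]; no multiplication or division is performed.
import Mathlib
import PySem

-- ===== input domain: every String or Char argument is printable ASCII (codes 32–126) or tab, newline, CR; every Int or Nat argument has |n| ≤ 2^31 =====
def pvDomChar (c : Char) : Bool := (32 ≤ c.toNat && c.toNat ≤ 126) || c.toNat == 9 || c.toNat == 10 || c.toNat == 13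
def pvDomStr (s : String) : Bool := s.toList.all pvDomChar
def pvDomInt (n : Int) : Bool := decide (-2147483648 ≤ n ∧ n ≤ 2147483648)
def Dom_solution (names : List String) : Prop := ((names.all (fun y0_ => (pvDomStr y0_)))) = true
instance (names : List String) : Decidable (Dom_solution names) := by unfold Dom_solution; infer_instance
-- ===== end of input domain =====

-- B replaces A's dedup + falling-factorial product + four floor divisions with a single
-- pass maintaining a Pascal-triangle DP (dp[k] = number of k-subsets of distinct names
-- seen so far); same cost, no multiplication/division.

-- ===== PORT A =====
-- 'while cnt != 4: answer *= n; n -= 1; cnt += 1' — executes exactly 4 - cnt iterations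
-- (cnt starts at 0); modelled by the remaining iteration count.
def solutionLoop : Nat → Int → Int → Int
  | 0, answer, _ => answer
  | k + 1, answer, n => solutionLoop k (answer * n) (n - 1)

def solution (names : List String) : Int :=
  let names' := PySem.Set.ofList names        -- list(set(names))
  let n : Int := (names'.length : Int)
  let answer : Int := solutionLoop 4 1 n
  -- for i in range(1,5): answer //= i
  (PySem.List.pyRange 1 5 1).foldl (fun ans i => PySem.Int.floordiv ans i) answer

-- ===== PORT B =====
-- inner 'for k in range(4, 0, -1): dp[k] += dp[k-1]' on the 5-slot dp list, as a tuple
def bStep (dp : Int × Int × Int × Int × Int) : Int × Int × Int × Int × Int :=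
  match dp with
  | (d0, d1, d2, d3, d4) => (d0, d1 + d0, d2 + d1, d3 + d2, d4 + d3)

-- 'for name in names: if name not in seen: seen.add(name); <inner loop>'
def bLoop : List String → PySem.Set String → (Int × Int × Int × Int × Int) → Int
  | [], _, dp => dp.2.2.2.2
  | x :: xs, seen, dp =>
    if PySem.Set.contains seen x then bLoop xs seen dp
    else bLoop xs (PySem.Set.add seen x) (bStep dp)

def solution_alt (names : List String) : Int :=
  bLoop names PySem.Set.empty (1, 0, 0, 0, 0)

-- ===== PRECONDITION & SPEC =====
def Spec_solution (names : List String) (out : Int) : Prop := out = solution_alt names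
instance (names : List String) (out : Int) : Decidable (Spec_solution names out) := by unfold Spec_solution; infer_instance

-- ===== CLAIM (what is proved, stated in full; the proofs are below) =====
def Claim_equal_solution : Prop := ∀ (names : List String), Dom_solution names → Spec_solution names (solution names)

-- ===== LEMMAS AND PROOFS =====

-- A's loop value: 1·m·(m-1)·(m-2)·(m-3) as an Int, equals the ℕ descending factorial
theorem prod_eq_descFactorial (m : Nat) :
    solutionLoop 4 1 (m : Int) = ((m.descFactorial 4 : Nat) : Int) := by
  rcases Nat.lt_or_ge m 4 with h | h
  · interval_cases m <;> decide
  · obtain ⟨k, rfl⟩ := Nat.exists_eq_add_of_le h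
    have e3 : 4 + k - 3 = k + 1 := by omega
    have e2 : 4 + k - 2 = k + 2 := by omega
    have e1 : 4 + k - 1 = k + 3 := by omega
    have e0 : 4 + k - 0 = k + 4 := by omega
    simp only [solutionLoop, Nat.descFactorial, e3, e2, e1, e0]
    push_cast
    ring

-- A computes C(m, 4) where m = number of distinct names
theorem solutionA_eq_choose (m : Nat) :
    (PySem.List.pyRange 1 5 1).foldl (fun ans i => PySem.Int.floordiv ans i)
      (solutionLoop 4 1 (m : Int)) = (m.choose 4 : Int) := by
  have hp : PySem.List.pyRange 1 5 1 = [1, 2, 3, 4] := by decide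
  rw [hp, prod_eq_descFactorial, Nat.descFactorial_eq_factorial_mul_choose]
  simp only [List.foldl]
  rw [PySem.Int.floordiv_eq_ediv_of_pos (by norm_num : (0:Int) < 1)]
  rw [PySem.Int.floordiv_eq_ediv_of_pos (by norm_num : (0:Int) < 2)]
  rw [PySem.Int.floordiv_eq_ediv_of_pos (by norm_num : (0:Int) < 3)]
  rw [PySem.Int.floordiv_eq_ediv_of_pos (by norm_num : (0:Int) < 4)]
  have h0 : (0 : Int) ≤ (m.choose 4 : Int) := by positivity
  have hfac : (Nat.factorial 4) = 24 := by decide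
  rw [hfac]
  push_cast
  omega

-- B's loop invariant: starting from dp[k] = C(|seen|, k), the pass returns
-- C(|seen ∪ xs|, 4).  Pascal's rule matches the 'dp[k] += dp[k-1]' update.
theorem bLoop_invariant (xs : List String) (seen : PySem.Set String) :
    bLoop xs seen
      ((seen.length.choose 0 : Int), (seen.length.choose 1 : Int),
       (seen.length.choose 2 : Int), (seen.length.choose 3 : Int),
       (seen.length.choose 4 : Int))
      = (((xs.foldl PySem.Set.add seen).length.choose 4 : Nat) : Int) := by
  induction xs generalizing seen with
  | nil => simp [bLoop]
  | cons x xs ih =>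
    by_cases hx : PySem.Set.contains seen x = true
    · simp only [bLoop, hx, if_pos, List.foldl_cons, PySem.Set.add]
      exact ih seen
    · have hmem : x ∉ seen := by simpa using hx
      have hadd : (PySem.Set.add seen x).length = seen.length + 1 := by
        simp [PySem.Set.add, hmem]
      have htup : (bStep ((seen.length.choose 0 : Int), (seen.length.choose 1 : Int),
            (seen.length.choose 2 : Int), (seen.length.choose 3 : Int),
            (seen.length.choose 4 : Int)))
          = (((seen.length + 1).choose 0 : Int), ((seen.length + 1).choose 1 : Int),
             ((seen.length + 1).choose 2 : Int), ((seen.length + 1).choose 3 : Int),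
             ((seen.length + 1).choose 4 : Int)) := by
        simp only [bStep, Nat.choose_succ_succ]
        push_cast
        refine Prod.ext ?_ (Prod.ext ?_ (Prod.ext ?_ (Prod.ext ?_ ?_))) <;> simp <;> ring
      simp only [bLoop, hx, if_false, Bool.false_eq_true, List.foldl_cons]
      rw [htup]
      have := ih (PySem.Set.add seen x)
      rw [hadd] at this
      exact this

-- ===== VERDICT (by name: the statement is the Claim_ definition above) =====
theorem solution_spec : Claim_equal_solution := by
  intro names _
  unfold Spec_solution solution solution_alt
  rw [solutionA_eq_choose (PySem.Set.ofList names).length]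
  have h := bLoop_invariant names PySem.Set.empty
  simp only [PySem.Set.empty] at h
  rw [← PySem.Set.ofList_eq_foldl] at h
  simpa using h.symm
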